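-- pv_equiv track=rewrite | github.com/Aryudesu/ABC | Library/partition.py | calc_coeff
-- ===== SOURCE A (Python) =====
-- def get2num(num: int, N: int) -> list:
--     tmp = num
--     result = []
--     for _ in range(N):
--         result.append(tmp % 2)
--         tmp //= 2
--     return result
--
-- def calc_coeff(A: list) -> dict:
--     lA = len(A)
--     result = dict()
--     for i in range(1, 2 ** lA):
--         tmp = get2num(i, lA)
--         n = 0
--         c = 0
--         for i in range(lA):
--             if tmp[i]:
--                 n += A[i]
--                 c += 1
--         if c % 2:
--             result[n] = result.get(n, 0) + 1
--         else:
--             result[n] = result.get(n, 0) - 1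
--     return result
-- ===== SOURCE B (Python) =====
-- def calc_coeff(A: list) -> dict:
--     # Subset-sum DP: one pass over A; result[s] holds the net signed count
--     # (odd-size subsets minus even-size subsets) of nonempty subsets summing to s.
--     result = dict()
--     for a in A:
--         old = list(result.items())
--         result[a] = result.get(a, 0) + 1
--         for s, w in old:
--             result[s + a] = result.get(s + a, 0) - w
--     return result
-- ===== Notes on version B (the rewrite author's own statement) =====
-- stated objective: faster
-- what changed: Replaced the O(2^n) enumeration of all nonempty subsets (binary counters per subset) by a one-pass subset-sum DP over the elements that updates a dict of signed coefficients, i.e. expanding the product of (1 - x^{A[i]}).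
import Mathlib
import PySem

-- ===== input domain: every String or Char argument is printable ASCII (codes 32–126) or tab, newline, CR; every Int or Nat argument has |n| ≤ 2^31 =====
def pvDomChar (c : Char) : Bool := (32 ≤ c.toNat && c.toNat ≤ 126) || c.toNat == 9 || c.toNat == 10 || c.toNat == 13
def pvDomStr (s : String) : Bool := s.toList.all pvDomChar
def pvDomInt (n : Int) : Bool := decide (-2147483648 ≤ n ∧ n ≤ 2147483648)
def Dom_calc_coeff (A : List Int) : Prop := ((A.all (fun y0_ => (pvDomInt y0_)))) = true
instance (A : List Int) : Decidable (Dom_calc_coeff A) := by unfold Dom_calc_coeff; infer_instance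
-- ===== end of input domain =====

-- B replaces the 2^n subset enumeration by a one-pass subset-sum DP over the elements (objective: faster).
-- ===== PORT A =====
def get2num (num : Int) (N : Int) : List Int :=
  (PySem.List.pyRange 0 N 1).foldl
    (fun (st : Int × List Int) _ =>
      (PySem.Int.floordiv st.1 2, st.2 ++ [PySem.Int.mod st.1 2]))
    (num, []) |>.2

def calc_coeff (A : List Int) : List (Int × Int) :=
  let lA : Int := PySem.List.len A
  let result : PySem.Dict Int Int :=
    (PySem.List.pyRange 1 (2 ^ A.length) 1).foldl
      (fun (result : PySem.Dict Int Int) i =>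
        let tmp := get2num i lA
        let nc : Int × Int :=
          (PySem.List.pyRange 0 lA 1).foldl
            (fun (nc : Int × Int) j =>
              if PySem.List.pyGetD tmp j 0 ≠ 0 then
                (nc.1 + PySem.List.pyGetD A j 0, nc.2 + 1)
              else nc)
            (0, 0)
        if PySem.Int.mod nc.2 2 ≠ 0 then
          result.insert nc.1 (result.getD nc.1 0 + 1)
        else
          result.insert nc.1 (result.getD nc.1 0 - 1))
      PySem.Dict.empty
  result.items

-- ===== PORT B =====
def calc_coeff_alt (A : List Int) : List (Int × Int) :=
  (A.foldl
    (fun (result : PySem.Dict Int Int) a =>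
      let old := result.items
      let result := result.insert a (result.getD a 0 + 1)
      old.foldl
        (fun (result : PySem.Dict Int Int) sw =>
          result.insert (sw.1 + a) (result.getD (sw.1 + a) 0 - sw.2))
        result)
    PySem.Dict.empty).items

-- ===== PRECONDITION & SPEC =====
def Spec_calc_coeff (A : List Int) (out : List (Int × Int)) : Prop := out = calc_coeff_alt A
instance (A : List Int) (out : List (Int × Int)) : Decidable (Spec_calc_coeff A out) := by unfold Spec_calc_coeff; infer_instance

-- ===== CLAIM (what is proved, stated in full; the proofs are below) =====
def Claim_equal_calc_coeff : Prop := ∀ (A : List Int), Dom_calc_coeff A → Spec_calc_coeff A (calc_coeff A)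

-- ===== LEMMAS AND PROOFS =====

def applyIncs (d : PySem.Dict Int Int) (L : List (Int × Int)) : PySem.Dict Int Int :=
  L.foldl (fun d p => d.insert p.1 (d.getD p.1 0 + p.2)) d

def sumAt (L : List (Int × Int)) (k : Int) : Int :=
  ((L.filter (fun p => p.1 == k)).map (·.2)).sum

theorem sumAt_nil (k : Int) : sumAt [] k = 0 := rfl

theorem sumAt_cons (p : Int × Int) (L : List (Int × Int)) (k : Int) :
    sumAt (p :: L) k = (if p.1 = k then p.2 else 0) + sumAt L k := by
  simp [sumAt, List.filter_cons]
  split_ifs with h <;> simp_all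

theorem sumAt_eq_zero_of_not_mem (L : List (Int × Int)) (k : Int)
    (h : k ∉ L.map Prod.fst) : sumAt L k = 0 := by
  induction L with
  | nil => rfl
  | cons p T ih =>
    rw [List.map_cons, List.mem_cons] at h
    push Not at h
    rw [sumAt_cons, ih h.2]
    simp [Ne.symm h.1]

theorem sumAt_map_shift (L : List (Int × Int)) (a k : Int) :
    sumAt (L.map (fun p => (p.1 + a, -p.2))) k = -sumAt L (k - a) := by
  induction L with
  | nil => simp [sumAt_nil]
  | cons p T ih =>
    simp only [List.map_cons, sumAt_cons, ih]
    have : p.1 + a = k ↔ p.1 = k - a := by omega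
    split_ifs with h1 h2 <;> omega

theorem applyIncs_nil (d : PySem.Dict Int Int) : applyIncs d [] = d := rfl

theorem applyIncs_cons (d : PySem.Dict Int Int) (p : Int × Int) (L : List (Int × Int)) :
    applyIncs d (p :: L) = applyIncs (d.insert p.1 (d.getD p.1 0 + p.2)) L := rfl

theorem applyIncs_items (L : List (Int × Int)) (d : PySem.Dict Int Int)
    (hnd : d.keys.Nodup) :
    (applyIncs d L).items =
      d.items.map (fun kv => (kv.1, kv.2 + sumAt L kv.1)) ++
      ((PySem.Set.ofList (L.map Prod.fst)).filter (fun k => !(d.contains k))).map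
        (fun k => (k, sumAt L k)) := by
  induction L generalizing d with
  | nil =>
    simp [applyIncs_nil, sumAt_nil, PySem.Set.ofList]
  | cons p T ih =>
    rw [applyIncs_cons, ih _ (PySem.Dict.nodup_keys_insert d p.1 _ hnd)]
    by_cases hc : d.contains p.1 = true
    · rw [PySem.Dict.items_insert_of_contains d _ hc]
      congr 1
      · rw [List.map_map]
        apply List.map_congr_left
        intro kv hkv
        by_cases hk : kv.1 = p.1
        · have hv : d.getD kv.1 0 = kv.2 := by
            obtain ⟨k1, v1⟩ := kv
            exact PySem.Dict.getD_of_mem_items d hkv hnd 0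
          simp only [Function.comp_apply, hk, BEq.rfl, if_pos, sumAt_cons]
          simp only [← hk, hv]
          rw [add_assoc]
        · have : (kv.1 == p.1) = false := by simp [hk]
          simp only [Function.comp_apply, this, Bool.false_eq_true, if_false, sumAt_cons,
            if_neg (Ne.symm hk), zero_add]
      · rw [List.map_cons, PySem.Set.ofList_cons, List.filter_cons]
        simp only [hc, Bool.not_true, Bool.false_eq_true, if_false]
        rw [PySem.Set.discard, List.filter_filter]
        have hpred : ∀ k : Int,
            (!(d.insert p.1 (d.getD p.1 0 + p.2)).contains k) = (!d.contains k && !k == p.1) := by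
          intro k
          rw [PySem.Dict.contains_insert]
          simp [Bool.not_or, Bool.and_comm]
        simp only [hpred]
        apply List.map_congr_left
        intro k hk
        rw [List.mem_filter] at hk
        have hkne : k ≠ p.1 := by
          have := hk.2
          simp at this
          exact this.2
        rw [sumAt_cons, if_neg (Ne.symm hkne), zero_add]
    · have hc' : d.contains p.1 = false := by simpa using hc
      have hp1 : p.1 ∉ d.keys := by
        intro hmem
        rw [← PySem.Dict.contains_iff_mem_keys] at hmem
        simp [hmem] at hc'
      rw [PySem.Dict.items_insert_of_not_contains d _ hc', List.map_append, List.append_assoc]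
      simp only [List.map_cons]
      rw [PySem.Set.ofList_cons, List.filter_cons]
      simp only [hc', Bool.not_false, if_pos]
      congr 1
      · apply List.map_congr_left
        intro kv hkv
        have hkne : kv.1 ≠ p.1 := by
          intro h
          exact hp1 (h ▸ PySem.Dict.mem_keys_of_mem_items d hkv)
        rw [sumAt_cons, if_neg (Ne.symm hkne), zero_add]
      · simp only [List.map_nil, List.map_cons]
        have hpred : ∀ k : Int,
            (!(d.insert p.1 (d.getD p.1 0 + p.2)).contains k) = (!d.contains k && !k == p.1) := by
          intro k
          rw [PySem.Dict.contains_insert]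
          simp [Bool.not_or, Bool.and_comm]
        rw [PySem.Set.discard, List.filter_filter]
        simp only [hpred]
        rw [PySem.Dict.getD_of_not_contains d 0 hc', zero_add, List.singleton_append,
          sumAt_cons, if_pos rfl]
        congr 1
        apply List.map_congr_left
        intro k hk
        rw [List.mem_filter] at hk
        have hkne : k ≠ p.1 := by
          have := hk.2
          simp at this
          exact this.2
        rw [sumAt_cons, if_neg (Ne.symm hkne), zero_add]

theorem applyIncs_nodup_keys (L : List (Int × Int)) (d : PySem.Dict Int Int)
    (h : d.keys.Nodup) : (applyIncs d L).keys.Nodup :=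
  PySem.Dict.nodup_keys_foldl_insert_key L Prod.fst (fun d x => d.getD x.1 0 + x.2) d h

theorem applyIncs_empty_items (L : List (Int × Int)) :
    (applyIncs PySem.Dict.empty L).items =
      (PySem.Set.ofList (L.map Prod.fst)).map (fun k => (k, sumAt L k)) := by
  have hemp : (PySem.Dict.empty : PySem.Dict Int Int).items = [] := rfl
  rw [applyIncs_items L PySem.Dict.empty (by rw [PySem.Dict.keys_empty]; exact List.nodup_nil)]
  simp [hemp, PySem.Dict.contains_empty]

theorem ofList_map_add (a : Int) (xs : List Int) :
    PySem.Set.ofList (xs.map (· + a)) = (PySem.Set.ofList xs).map (· + a) := by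
  induction xs using List.reverseRecOn with
  | nil => rfl
  | append_singleton xs x ih =>
    rw [List.map_append, List.map_singleton, PySem.Set.ofList_append_singleton,
      PySem.Set.ofList_append_singleton, ih]
    by_cases hx : x ∈ PySem.Set.ofList xs
    · rw [PySem.Set.add_of_mem hx, PySem.Set.add_of_mem (List.mem_map.mpr ⟨x, hx, rfl⟩)]
    · have hx2 : x + a ∉ (PySem.Set.ofList xs).map (· + a) := by
        intro hmem
        obtain ⟨y, hy, hxy⟩ := List.mem_map.mp hmem
        have : y = x := by omega
        exact hx (this ▸ hy)
      rw [PySem.Set.add_of_not_mem hx, PySem.Set.add_of_not_mem hx2,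
        List.map_append, List.map_singleton]

theorem sumAt_keyed (ks : List Int) (g : Int → Int) (k : Int) (hnd : ks.Nodup) :
    sumAt (ks.map (fun k => (k, g k))) k = if k ∈ ks then g k else 0 := by
  induction ks with
  | nil => simp [sumAt_nil]
  | cons x t ih =>
    rw [List.nodup_cons] at hnd
    rw [List.map_cons, sumAt_cons, ih hnd.2]
    by_cases hx : x = k
    · have hkt : k ∉ t := hx ▸ hnd.1
      simp [hx, hkt]
    · simp [hx, Ne.symm hx]

theorem pyRange_one_eq (a : Int) (m : Nat) :
    PySem.List.pyRange a (a + m) = (List.range m).map (fun (j : Nat) => a + (j : Int)) := by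
  induction m with
  | zero =>
    simp [PySem.List.pyRange]
  | succ m ih =>
    have : a + ((m + 1 : Nat) : Int) = (a + m) + 1 := by push_cast; ring
    rw [this, PySem.List.pyRange_one_succ_right (by omega), ih, List.range_succ,
      List.map_append, List.map_singleton]

theorem get2num_fold {α : Type} (l : List α) (num : Nat) (acc : List Int) :
    l.foldl (fun (st : Int × List Int) _ =>
        (PySem.Int.floordiv st.1 2, st.2 ++ [PySem.Int.mod st.1 2])) ((num : Int), acc)
      = (((num / 2 ^ l.length : Nat) : Int),
         acc ++ (List.range l.length).map (fun j => ((num / 2 ^ j % 2 : Nat) : Int))) := by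
  induction l generalizing num acc with
  | nil => simp
  | cons x t ih =>
    rw [List.foldl_cons]
    rw [show PySem.Int.floordiv (num : Int) 2 = ((num / 2 : Nat) : Int) from
      PySem.Int.floordiv_natCast num 2]
    rw [show PySem.Int.mod (num : Int) 2 = ((num % 2 : Nat) : Int) from
      PySem.Int.mod_natCast num 2]
    rw [ih]
    simp only [Prod.mk.injEq]
    refine ⟨by rw [Nat.div_div_eq_div_mul, List.length_cons, pow_succ']; , ?_⟩
    rw [List.length_cons, List.range_succ_eq_map, List.map_cons, List.map_map,
      List.append_assoc, List.singleton_append]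
    congr 1
    congr 1
    · norm_num
    · apply List.map_congr_left
      intro a _
      simp only [Function.comp_apply]
      rw [Nat.div_div_eq_div_mul, pow_succ']

theorem get2num_spec (i N : Nat) :
    get2num (i : Int) (N : Int) =
      (List.range N).map (fun j => ((i / 2 ^ j % 2 : Nat) : Int)) := by
  unfold get2num
  rw [PySem.List.pyRange_zero_natCast, get2num_fold]
  simp

def incA (A : List Int) (i : Int) : Int × Int :=
  let tmp := get2num i (PySem.List.len A)
  let nc : Int × Int :=
    (PySem.List.pyRange 0 (PySem.List.len A) 1).foldl
      (fun (nc : Int × Int) j =>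
        if PySem.List.pyGetD tmp j 0 ≠ 0 then
          (nc.1 + PySem.List.pyGetD A j 0, nc.2 + 1)
        else nc)
      (0, 0)
  (nc.1, if PySem.Int.mod nc.2 2 ≠ 0 then 1 else -1)

def ncN (A : List Int) (i : Nat) : Int × Int :=
  (List.range A.length).foldl
    (fun (nc : Int × Int) j =>
      if i / 2 ^ j % 2 = 1 then (nc.1 + A.getD j 0, nc.2 + 1) else nc)
    (0, 0)

theorem incA_natCast (A : List Int) (i : Nat) :
    incA A (i : Int) =
      ((ncN A i).1, if PySem.Int.mod (ncN A i).2 2 ≠ 0 then 1 else -1) := by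
  unfold incA ncN
  dsimp only
  rw [PySem.List.len_eq, get2num_spec, PySem.List.pyRange_zero_natCast, List.foldl_map]
  have hfold :
      List.foldl (fun (nc : Int × Int) (j : Nat) =>
          if PySem.List.pyGetD ((List.range A.length).map
              (fun j => ((i / 2 ^ j % 2 : Nat) : Int))) (j : Int) 0 ≠ 0 then
            (nc.1 + PySem.List.pyGetD A (j : Int) 0, nc.2 + 1)
          else nc) (0, 0) (List.range A.length)
      = List.foldl (fun (nc : Int × Int) j =>
          if i / 2 ^ j % 2 = 1 then (nc.1 + A.getD j 0, nc.2 + 1) else nc)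
          (0, 0) (List.range A.length) := by
    apply PySem.List.foldl_congr_mem
    intro acc j hj
    rw [List.mem_range] at hj
    rw [PySem.List.pyGetD_natCast, PySem.List.pyGetD_natCast,
      PySem.List.getD_map_range _ _ _ _ hj]
    have h2 : i / 2 ^ j % 2 = 0 ∨ i / 2 ^ j % 2 = 1 := Nat.mod_two_eq_zero_or_one _
    rcases h2 with h | h <;> simp [h]
  rw [hfold]

theorem bit_high_zero {i n : Nat} (h : i < 2 ^ n) : i / 2 ^ n % 2 = 0 := by
  rw [Nat.div_eq_of_lt h]

theorem bit_low_add {i' n j : Nat} (hj : j < n) :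
    (2 ^ n + i') / 2 ^ j % 2 = i' / 2 ^ j % 2 := by
  have hd : 2 ^ n = 2 ^ (n - j) * 2 ^ j := by
    rw [← pow_add, Nat.sub_add_cancel (le_of_lt hj)]
  rw [Nat.add_comm, hd, Nat.add_mul_div_right _ _ ((Nat.two_pow_pos _))]
  have he : 2 ^ (n - j) = 2 * 2 ^ (n - j - 1) := by
    rw [← pow_succ']
    congr 1
    omega
  omega

theorem bit_high_one {i' n : Nat} (h : i' < 2 ^ n) :
    (2 ^ n + i') / 2 ^ n % 2 = 1 := by
  rw [Nat.add_comm, Nat.add_div_right _ ((Nat.two_pow_pos _)),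
    Nat.div_eq_of_lt h]

theorem ncN_low (B : List Int) (a : Int) (i : Nat) (h : i < 2 ^ B.length) :
    ncN (B ++ [a]) i = ncN B i := by
  unfold ncN
  rw [List.length_append, List.length_singleton, List.range_succ, List.foldl_append]
  rw [List.foldl_cons, List.foldl_nil, bit_high_zero h, if_neg (by norm_num)]
  apply PySem.List.foldl_congr_mem
  intro acc j hj
  rw [List.mem_range] at hj
  rw [List.getD_append _ _ _ _ hj]

theorem ncN_pow (B : List Int) (a : Int) :
    ncN (B ++ [a]) (2 ^ B.length) = (a, 1) := by
  unfold ncN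
  rw [List.length_append, List.length_singleton, List.range_succ, List.foldl_append]
  have hz : List.foldl
      (fun (nc : Int × Int) j =>
        if 2 ^ B.length / 2 ^ j % 2 = 1 then (nc.1 + (B ++ [a]).getD j 0, nc.2 + 1) else nc)
      (0, 0) (List.range B.length) = ((0 : Int), (0 : Int)) := by
    rw [PySem.List.foldl_congr_mem _ _ (fun acc _ => acc) _ ?_, PySem.List.foldl_ignore]
    intro acc j hj
    rw [List.mem_range] at hj
    have : 2 ^ B.length / 2 ^ j % 2 = 0 := by
      have := bit_low_add (i' := 0) hj
      simpa using this
    rw [this, if_neg (by norm_num)]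
  rw [hz, List.foldl_cons, List.foldl_nil, Nat.div_self ((Nat.two_pow_pos _))]
  simp

theorem ncN_high (B : List Int) (a : Int) (i' : Nat) (h : i' < 2 ^ B.length) :
    ncN (B ++ [a]) (2 ^ B.length + i') = ((ncN B i').1 + a, (ncN B i').2 + 1) := by
  unfold ncN
  rw [List.length_append, List.length_singleton, List.range_succ, List.foldl_append]
  have hmain : List.foldl
      (fun (nc : Int × Int) j =>
        if (2 ^ B.length + i') / 2 ^ j % 2 = 1 then (nc.1 + (B ++ [a]).getD j 0, nc.2 + 1) else nc)
      (0, 0) (List.range B.length)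
      = List.foldl
      (fun (nc : Int × Int) j =>
        if i' / 2 ^ j % 2 = 1 then (nc.1 + B.getD j 0, nc.2 + 1) else nc)
      (0, 0) (List.range B.length) := by
    apply PySem.List.foldl_congr_mem
    intro acc j hj
    rw [List.mem_range] at hj
    rw [bit_low_add hj, List.getD_append _ _ _ _ hj]
  rw [hmain, List.foldl_cons, List.foldl_nil, bit_high_one h, if_pos rfl]
  simp

theorem incA_low (B : List Int) (a : Int) (i : Nat) (h : i < 2 ^ B.length) :
    incA (B ++ [a]) (i : Int) = incA B (i : Int) := by
  rw [incA_natCast, incA_natCast, ncN_low _ _ _ h]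

theorem incA_pow (B : List Int) (a : Int) :
    incA (B ++ [a]) ((2 ^ B.length : Nat) : Int) = (a, 1) := by
  rw [incA_natCast, ncN_pow]
  simp

theorem incA_high (B : List Int) (a : Int) (i' : Nat) (h : i' < 2 ^ B.length) :
    incA (B ++ [a]) ((2 ^ B.length + i' : Nat) : Int)
      = ((incA B (i' : Int)).1 + a, -(incA B (i' : Int)).2) := by
  rw [incA_natCast, incA_natCast, ncN_high _ _ _ h]
  simp only [Prod.mk.injEq]
  refine ⟨trivial, ?_⟩
  simp only [PySem.Int.mod_eq_emod_of_pos (by norm_num : (0:Int) < 2)]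
  split_ifs with h1 h2 h2 <;> omega

def incsL (A : List Int) : List (Int × Int) :=
  (PySem.List.pyRange 1 (2 ^ A.length)).map (incA A)

theorem incsL_eq (A : List Int) :
    incsL A = (List.range (2 ^ A.length - 1)).map
      (fun j : Nat => incA A ((1 + j : Nat) : Int)) := by
  unfold incsL
  have ht : 1 ≤ 2 ^ A.length := Nat.one_le_two_pow
  have hpow : ((2 ^ A.length : Nat) : Int) = (2 : Int) ^ A.length := by push_cast; ring
  have h : ((2 : Int) ^ A.length) = 1 + ((2 ^ A.length - 1 : Nat) : Int) := by
    rw [← hpow]; omega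
  rw [h, pyRange_one_eq, List.map_map]
  apply List.map_congr_left
  intro j _
  simp only [Function.comp_apply]
  congr 1

theorem incsL_concat (B : List Int) (a : Int) :
    incsL (B ++ [a]) = incsL B ++ (a, 1) :: (incsL B).map (fun p => (p.1 + a, -p.2)) := by
  have ht : 1 ≤ 2 ^ B.length := Nat.one_le_two_pow
  rw [incsL_eq, incsL_eq, List.length_append, List.length_singleton]
  have hsplit : 2 ^ (B.length + 1) - 1 = (2 ^ B.length - 1) + 2 ^ B.length := by
    have : 2 ^ (B.length + 1) = 2 ^ B.length * 2 := by rw [pow_succ]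
    omega
  rw [hsplit, List.range_add, List.map_append]
  congr 1
  · apply List.map_congr_left
    intro j hj
    rw [List.mem_range] at hj
    have h1j : 1 + j < 2 ^ B.length := by omega
    exact incA_low B a (1 + j) h1j
  · rw [show (2 : Nat) ^ B.length = (2 ^ B.length - 1) + 1 from by omega,
      List.range_succ_eq_map, List.map_cons, List.map_cons, List.map_map, List.map_map]
    congr 1
    · rw [show (1 + (2 ^ B.length - 1 + 1 - 1 + 0) : Nat) = 2 ^ B.length from by omega]
      exact incA_pow B a
    · rw [List.map_map]
      apply List.map_congr_left
      intro j hj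
      rw [List.mem_range] at hj
      simp only [Function.comp_apply]
      rw [show (1 + (2 ^ B.length - 1 + 1 - 1 + Nat.succ j) : Nat) = 2 ^ B.length + (1 + j) from by omega]
      exact incA_high B a (1 + j) (by omega)

def calc_coeffD (A : List Int) : PySem.Dict Int Int :=
  applyIncs PySem.Dict.empty (incsL A)

def altStep (d : PySem.Dict Int Int) (a : Int) : PySem.Dict Int Int :=
  let old := d.items
  let d' := d.insert a (d.getD a 0 + 1)
  old.foldl
    (fun (result : PySem.Dict Int Int) sw =>
      result.insert (sw.1 + a) (result.getD (sw.1 + a) 0 - sw.2))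
    d'

def altD (A : List Int) : PySem.Dict Int Int :=
  A.foldl altStep PySem.Dict.empty

theorem portA_eq (A : List Int) : calc_coeff A = (calc_coeffD A).items := by
  unfold calc_coeff calc_coeffD applyIncs incsL
  dsimp only
  rw [List.foldl_map]
  congr 1
  apply PySem.List.foldl_congr_mem
  intro d i _
  unfold incA
  dsimp only
  set nc := (PySem.List.pyRange 0 (PySem.List.len A) 1).foldl
    (fun (nc : Int × Int) j =>
      if PySem.List.pyGetD (get2num i (PySem.List.len A)) j 0 ≠ 0 then
        (nc.1 + PySem.List.pyGetD A j 0, nc.2 + 1)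
      else nc)
    (0, 0) with hnc
  split_ifs with h
  · rfl
  · rw [sub_eq_add_neg]

theorem portB_eq (A : List Int) : calc_coeff_alt A = (altD A).items := rfl

theorem applyIncs_append (d : PySem.Dict Int Int) (L1 L2 : List (Int × Int)) :
    applyIncs d (L1 ++ L2) = applyIncs (applyIncs d L1) L2 :=
  List.foldl_append

theorem altStep_eq (d : PySem.Dict Int Int) (a : Int) :
    altStep d a = applyIncs d ((a, 1) :: d.items.map (fun sw => (sw.1 + a, -sw.2))) := by
  unfold altStep applyIncs
  dsimp only
  rw [List.foldl_cons, List.foldl_map]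
  apply PySem.List.foldl_congr_mem
  intro acc sw _
  rw [sub_eq_add_neg]

theorem keys_shift_eq (L : List (Int × Int)) (a : Int) :
    PySem.Set.ofList (((a, (1:Int)) :: L.map (fun p => (p.1 + a, -p.2))).map Prod.fst)
      = PySem.Set.ofList (((a, (1:Int)) ::
          ((PySem.Set.ofList (L.map Prod.fst)).map (fun k => (k, sumAt L k))).map
            (fun sw => (sw.1 + a, -sw.2))).map Prod.fst) := by
  rw [List.map_cons, List.map_cons, List.map_map, List.map_map]
  rw [PySem.Set.ofList_cons, PySem.Set.ofList_cons]
  congr 1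
  have h1 : L.map (Prod.fst ∘ fun p => (p.1 + a, -p.2)) = (L.map Prod.fst).map (· + a) := by
    rw [List.map_map]
    apply List.map_congr_left
    intro p _
    rfl
  have h2 : ((PySem.Set.ofList (L.map Prod.fst)).map (fun k => (k, sumAt L k))).map
      (Prod.fst ∘ fun sw => (sw.1 + a, -sw.2))
      = (PySem.Set.ofList (L.map Prod.fst)).map (· + a) := by
    rw [List.map_map]
    apply List.map_congr_left
    intro p _
    rfl
  have hnodup : ((PySem.Set.ofList (L.map Prod.fst)).map (· + a)).Nodup :=
    List.Nodup.map (fun x y h => by omega) (PySem.Set.nodup_ofList _)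
  rw [h1, h2, ofList_map_add, PySem.Set.ofList_eq_self_of_nodup _ hnodup]

theorem sumAt_shift_eq (L : List (Int × Int)) (a k : Int) :
    sumAt (((a, (1:Int)) :: L.map (fun p => (p.1 + a, -p.2)))) k
      = sumAt (((a, (1:Int)) ::
          ((PySem.Set.ofList (L.map Prod.fst)).map (fun k => (k, sumAt L k))).map
            (fun sw => (sw.1 + a, -sw.2)))) k := by
  rw [sumAt_cons, sumAt_cons, sumAt_map_shift]
  congr 1
  rw [List.map_map]
  have hre : ((PySem.Set.ofList (L.map Prod.fst)).map
      ((fun p : Int × Int => (p.1 + a, -p.2)) ∘ fun k => (k, sumAt L k)))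
      = ((PySem.Set.ofList (L.map Prod.fst)).map (· + a)).map
          (fun k' => (k', -(sumAt L (k' - a)))) := by
    rw [List.map_map]
    apply List.map_congr_left
    intro k0 _
    simp only [Function.comp_apply]
    rw [show k0 + a - a = k0 from by omega]
  rw [hre, sumAt_keyed _ _ _ (List.Nodup.map (fun x y h => by omega) (PySem.Set.nodup_ofList _))]
  by_cases hm : k - a ∈ L.map Prod.fst
  · rw [if_pos]
    exact List.mem_map.mpr ⟨k - a, (PySem.Set.mem_ofList _ _).mpr hm, by omega⟩
  · rw [if_neg, sumAt_eq_zero_of_not_mem _ _ hm, neg_zero]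
    intro hmem
    obtain ⟨k0, hk0, hk0a⟩ := List.mem_map.mp hmem
    exact hm (by
      have : k0 = k - a := by omega
      exact this ▸ (PySem.Set.mem_ofList _ _).mp hk0)

theorem applyIncs_step_eq (L : List (Int × Int)) (a : Int) :
    applyIncs (applyIncs PySem.Dict.empty L)
        ((a, 1) :: L.map (fun p => (p.1 + a, -p.2)))
      = applyIncs (applyIncs PySem.Dict.empty L)
        ((a, 1) :: (applyIncs PySem.Dict.empty L).items.map (fun sw => (sw.1 + a, -sw.2))) := by
  have hnd : (applyIncs PySem.Dict.empty L).keys.Nodup :=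
    applyIncs_nodup_keys L PySem.Dict.empty (by rw [PySem.Dict.keys_empty]; exact List.nodup_nil)
  have hitems := applyIncs_empty_items L
  apply PySem.Dict.ext
  rw [applyIncs_items _ _ hnd, applyIncs_items _ _ hnd]
  congr 1
  · apply List.map_congr_left
    intro kv _
    rw [show ((a, (1:Int)) :: (applyIncs PySem.Dict.empty L).items.map (fun sw => (sw.1 + a, -sw.2)))
        = ((a, (1:Int)) :: ((PySem.Set.ofList (L.map Prod.fst)).map (fun k => (k, sumAt L k))).map
            (fun sw => (sw.1 + a, -sw.2))) from by rw [hitems],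
      ← sumAt_shift_eq]
  · rw [show ((a, (1:Int)) :: (applyIncs PySem.Dict.empty L).items.map (fun sw => (sw.1 + a, -sw.2)))
        = ((a, (1:Int)) :: ((PySem.Set.ofList (L.map Prod.fst)).map (fun k => (k, sumAt L k))).map
            (fun sw => (sw.1 + a, -sw.2))) from by rw [hitems]]
    rw [← keys_shift_eq]
    apply List.map_congr_left
    intro k _
    rw [← sumAt_shift_eq]

theorem mainD (A : List Int) : calc_coeffD A = altD A := by
  induction A using List.reverseRecOn with
  | nil => rfl
  | append_singleton B a ih =>
    unfold altD
    rw [List.foldl_append, List.foldl_cons, List.foldl_nil]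
    have : List.foldl altStep PySem.Dict.empty B = altD B := rfl
    rw [this, ← ih]
    unfold calc_coeffD
    rw [incsL_concat, applyIncs_append, applyIncs_step_eq, ← altStep_eq]

theorem final (A : List Int) : calc_coeff A = calc_coeff_alt A := by
  rw [portA_eq, portB_eq, mainD]

-- ===== VERDICT (by name: the statement is the Claim_ definition above) =====
theorem calc_coeff_spec : Claim_equal_calc_coeff := by
  intro A _
  exact final A
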